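-- pv_equiv track=rewrite | github.com/deepchecks/deepchecks | deepchecks/utils/other.py | to_ordional_enumeration
-- ===== SOURCE A (Python) =====
-- import typing as t
--
-- T = t.TypeVar("T")
--
-- def to_ordional_enumeration(data: t.List[T]) -> t.Dict[T, int]:
--     """Enumarate each unique item."""
--     counter = 0
--     enum = {}
--     for it in data:
--         if it not in enum:
--             enum[it] = counter
--             counter += 1
--     return enum
-- ===== SOURCE B (Python) =====
-- def to_ordional_enumeration(data):
--     """Enumarate each unique item."""
--     first = {}
--     for i, it in reversed(list(enumerate(data))):
--         first[it] = i
--     return {it: rank for rank, it in enumerate(sorted(first, key=first.get))}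
-- ===== Notes on version B (the rewrite author's own statement) =====
-- stated objective: alternative
-- what changed: Replaces A's single guarded-accumulation pass (manual counter + membership-checked dict insert) by a sort-based ranking: a reverse overwrite pass records each item's first index (last write wins, no membership test, no counter), then the unique keys are sorted by that first index and enumerated; correct because first-occurrence indices are distinct, so the sort reproduces first-occurrence order.
import Mathlib
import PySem

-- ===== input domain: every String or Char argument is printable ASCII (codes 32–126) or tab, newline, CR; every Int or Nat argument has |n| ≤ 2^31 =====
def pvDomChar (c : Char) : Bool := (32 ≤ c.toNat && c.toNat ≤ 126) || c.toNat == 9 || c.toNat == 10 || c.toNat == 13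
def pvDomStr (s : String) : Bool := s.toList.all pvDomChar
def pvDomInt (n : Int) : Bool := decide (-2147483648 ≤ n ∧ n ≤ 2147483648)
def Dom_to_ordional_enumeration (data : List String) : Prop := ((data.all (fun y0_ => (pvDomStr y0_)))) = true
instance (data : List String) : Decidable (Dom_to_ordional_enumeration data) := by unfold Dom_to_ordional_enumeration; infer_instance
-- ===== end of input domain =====

-- B builds the same first-occurrence index map by a reverse overwrite pass plus a sort of the keys by stored first index, instead of A's guarded forward pass with a counter (alternative algorithm, same result).
-- ===== PORT A =====
-- counter/enum loop: state (counter, enum); 'if it not in enum' guards the insertion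
def to_ordional_enumeration (data : List String) : List (String × Int) :=
  (data.foldl
    (fun (st : Int × PySem.Dict String Int) it =>
      if st.2.contains it = false then (st.1 + 1, st.2.insert it st.1) else st)
    (0, PySem.Dict.empty)).2.items

-- ===== PORT B =====
-- reverse overwrite pass: for i, it in reversed(list(enumerate(data))): first[it] = i;
-- then sorted(first, key=first.get) iterates the dict keys sorted by stored first index.
-- first.get(it) → first.getD it 0, exact here because every iterated key has a stored value.
def to_ordional_enumeration_alt (data : List String) : List (String × Int) :=
  let first : PySem.Dict String Int :=
    ((PySem.List.enumerate data 0).reverse).foldl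
      (fun (d : PySem.Dict String Int) p => d.insert p.2 p.1) PySem.Dict.empty
  (PySem.List.enumerate
      (PySem.List.sorted first.keys (fun it => first.getD it 0) false) 0).map
    (fun p => (p.2, p.1))

-- ===== PRECONDITION & SPEC =====
def Spec_to_ordional_enumeration (data : List String) (out : List (String × Int)) : Prop := out = to_ordional_enumeration_alt data
instance (data : List String) (out : List (String × Int)) : Decidable (Spec_to_ordional_enumeration data out) := by unfold Spec_to_ordional_enumeration; infer_instance

-- ===== CLAIM (what is proved, stated in full; the proofs are below) =====
def Claim_equal_to_ordional_enumeration : Prop := ∀ (data : List String), Dom_to_ordional_enumeration data → Spec_to_ordional_enumeration data (to_ordional_enumeration data)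

-- ===== LEMMAS AND PROOFS =====
lemma idx_lt_length {xs : List String} {a : String} (h : a ∈ xs) :
    (PySem.List.index? xs a).getD 0 < xs.length := by
  obtain ⟨k, hk⟩ := Option.isSome_iff_exists.mp ((PySem.List.index?_isSome_iff xs a).mpr h)
  obtain ⟨pre, suf, hxs, hlen, -⟩ := (PySem.List.index?_eq_some_iff xs a k).mp hk
  subst hxs
  simp only [PySem.List.index?_eq_idxOf?] at hk ⊢
  rw [hk]
  simp only [Option.getD_some, List.length_append, List.length_cons]
  omega

-- first-occurrence indices are strictly increasing along set(data)
lemma ofList_pairwise_idx (data : List String) :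
    (PySem.Set.ofList data).Pairwise
      (fun a b => ((PySem.List.index? data a).getD 0 : Nat) < (PySem.List.index? data b).getD 0) := by
  induction data using List.reverseRecOn with
  | nil => simp [PySem.Set.ofList]
  | append_singleton xs x ih =>
      have hof : PySem.Set.ofList (xs ++ [x]) = PySem.Set.add (PySem.Set.ofList xs) x := by
        simp [PySem.Set.ofList_eq_foldl, List.foldl_append]
      have hkeep : (PySem.Set.ofList xs).Pairwise
          (fun a b => ((PySem.List.index? (xs ++ [x]) a).getD 0 : Nat)
            < (PySem.List.index? (xs ++ [x]) b).getD 0) := by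
        refine ih.imp_of_mem (fun {a b} ha hb hab => ?_)
        rw [PySem.List.index?_append_of_mem _ ((PySem.Set.mem_ofList xs a).mp ha),
            PySem.List.index?_append_of_mem _ ((PySem.Set.mem_ofList xs b).mp hb)]
        exact hab
      by_cases hx : x ∈ xs
      · have : PySem.Set.add (PySem.Set.ofList xs) x = PySem.Set.ofList xs := by
          simp [PySem.Set.add, PySem.Set.contains, (PySem.Set.mem_ofList xs x).mpr hx]
        rw [hof, this]; exact hkeep
      · have hxset : x ∉ PySem.Set.ofList xs := fun h => hx ((PySem.Set.mem_ofList xs x).mp h)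
        have : PySem.Set.add (PySem.Set.ofList xs) x = PySem.Set.ofList xs ++ [x] := by
          simp [PySem.Set.add, PySem.Set.contains, hxset]
        rw [hof, this, List.pairwise_append]
        refine ⟨hkeep, by simp, ?_⟩
        intro a ha b hb
        have hb' : b = x := by simpa using hb
        rw [hb']
        have ha' : a ∈ xs := (PySem.Set.mem_ofList xs a).mp ha
        rw [PySem.List.index?_append_of_mem _ ha',
            PySem.List.index?_append_singleton_self xs x hx]
        simpa using idx_lt_length ha'

-- the value stored for k by the reverse-overwrite fold is k's FIRST index in data (+ start offset)
lemma fold_getD (data : List String) : ∀ (s : Int) (k : String), k ∈ data →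
    ((PySem.List.enumerate data s).foldr
        (fun p (d : PySem.Dict String Int) => d.insert p.2 p.1) PySem.Dict.empty).getD k 0
      = s + ((PySem.List.index? data k).getD 0 : Int) := by
  induction data with
  | nil => intro s k hk; simp at hk
  | cons x xs ih =>
      intro s k hk
      rw [PySem.List.enumerate_cons]
      simp only [List.foldr_cons]
      rw [PySem.Dict.getD_insert]
      by_cases hkx : k = x
      · subst hkx
        rw [if_pos rfl, PySem.List.index?_cons_self]
        simp
      · have hk' : k ∈ xs := by
          rcases List.mem_cons.mp hk with h | h
          · exact absurd h hkx
          · exact h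
        rw [if_neg hkx, ih (s + 1) k hk',
            PySem.List.index?_cons_of_ne xs (Ne.symm hkx)]
        obtain ⟨j, hj⟩ := Option.isSome_iff_exists.mp ((PySem.List.index?_isSome_iff xs k).mpr hk')
        rw [hj]
        simp
        ring

-- keys of the reverse-overwrite dict: the distinct elements in reversed-first-occurrence order
lemma fold_keys (data : List String) :
    (((PySem.List.enumerate data 0).reverse).foldl
        (fun (d : PySem.Dict String Int) p => d.insert p.2 p.1) PySem.Dict.empty).keys
      = PySem.Set.ofList data.reverse := by
  have h := PySem.Dict.keys_foldl_insert_key ((PySem.List.enumerate data 0).reverse)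
      (fun q : Int × String => q.2) (fun (_ : PySem.Dict String Int) q => q.1) PySem.Dict.empty
  rw [h, List.map_reverse, PySem.List.map_snd_enumerate]
  simp [PySem.Dict.empty, PySem.Dict.keys, PySem.Set.update, PySem.Set.ofList_eq_foldl]

-- the sort in B reproduces first-occurrence order: sorting the keys by stored first index yields set(data)
lemma sorted_keys_idx (data : List String) :
    PySem.List.sorted
        (((PySem.List.enumerate data 0).reverse).foldl
          (fun (d : PySem.Dict String Int) p => d.insert p.2 p.1) PySem.Dict.empty).keys
        (fun it =>
          (((PySem.List.enumerate data 0).reverse).foldl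
            (fun (d : PySem.Dict String Int) p => d.insert p.2 p.1) PySem.Dict.empty).getD it 0)
        false
      = PySem.Set.ofList data := by
  have hgetD : ∀ k ∈ data,
      (((PySem.List.enumerate data 0).reverse).foldl
        (fun (d : PySem.Dict String Int) p => d.insert p.2 p.1) PySem.Dict.empty).getD k 0
      = ((PySem.List.index? data k).getD 0 : Int) := by
    intro k hk
    rw [List.foldl_reverse]
    have := fold_getD data 0 k hk
    simpa using this
  have hperm : (PySem.Set.ofList data).Perm
      (((PySem.List.enumerate data 0).reverse).foldl
        (fun (d : PySem.Dict String Int) p => d.insert p.2 p.1) PySem.Dict.empty).keys := by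
    rw [fold_keys]
    refine (List.perm_ext_iff_of_nodup (PySem.Set.nodup_ofList data)
      (PySem.Set.nodup_ofList data.reverse)).mpr ?_
    intro a
    rw [PySem.Set.mem_ofList, PySem.Set.mem_ofList, List.mem_reverse]
  have hpair : (PySem.Set.ofList data).Pairwise (fun a b =>
      (((PySem.List.enumerate data 0).reverse).foldl
        (fun (d : PySem.Dict String Int) p => d.insert p.2 p.1) PySem.Dict.empty).getD a 0
      < (((PySem.List.enumerate data 0).reverse).foldl
        (fun (d : PySem.Dict String Int) p => d.insert p.2 p.1) PySem.Dict.empty).getD b 0) := by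
    refine (ofList_pairwise_idx data).imp_of_mem (fun {a b} ha hb hab => ?_)
    rw [hgetD a ((PySem.Set.mem_ofList data a).mp ha),
        hgetD b ((PySem.Set.mem_ofList data b).mp hb)]
    exact_mod_cast hab
  exact PySem.List.sorted_eq_of_perm_of_pairwise_lt _ _ _ hperm hpair

lemma enumerate_append_singleton {α : Type} (l : List α) (x : α) (s : Int) :
    PySem.List.enumerate (l ++ [x]) s
      = PySem.List.enumerate l s ++ [((s + l.length : Int), x)] := by
  induction l generalizing s with
  | nil => simp [PySem.List.enumerate_cons, PySem.List.enumerate_nil]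
  | cons y ys ih =>
      simp [PySem.List.enumerate_cons, ih (s + 1)]
      ring_nf

-- invariant of A's loop: items stay the swapped enumeration of the keys in insertion order
lemma loop_inv (l : List String) : ∀ (d : PySem.Dict String Int),
    d.keys.Nodup →
    d.items = (PySem.List.enumerate d.keys 0).map (fun p => (p.2, p.1)) →
    (l.foldl
      (fun (st : Int × PySem.Dict String Int) it =>
        if st.2.contains it = false then (st.1 + 1, st.2.insert it st.1) else st)
      ((d.size : Int), d)).2.items
      = (PySem.List.enumerate (PySem.Set.update d.keys l) 0).map (fun p => (p.2, p.1)) := by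
  induction l with
  | nil => intro d hnd hit; simpa [PySem.Set.update] using hit
  | cons x xs ih =>
      intro d hnd hit
      by_cases hc : d.contains x = true
      · have hmem : x ∈ d.keys := (PySem.Dict.contains_iff_mem_keys d x).mp hc
        have hadd : PySem.Set.add d.keys x = d.keys := by
          simp [PySem.Set.add, PySem.Set.contains, hmem]
        have hstep : (fun (st : Int × PySem.Dict String Int) it =>
            if st.2.contains it = false then (st.1 + 1, st.2.insert it st.1) else st)
            ((d.size : Int), d) x = ((d.size : Int), d) := by
          simp [hc]
        simp only [List.foldl_cons, hstep, PySem.Set.update, hadd]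
        exact ih d hnd hit
      · have hc' : d.contains x = false := by simpa using hc
        have hmem : x ∉ d.keys := fun h => by
          simp [(PySem.Dict.contains_iff_mem_keys d x).mpr h] at hc'
        set d' := d.insert x (d.size : Int) with hd'
        have hkeys : d'.keys = d.keys ++ [x] :=
          PySem.Dict.keys_insert_of_not_contains d _ hc'
        have hnd' : d'.keys.Nodup := by
          rw [hkeys]
          refine List.Nodup.append hnd (by simp) ?_
          simpa [List.disjoint_singleton] using hmem
        have hitems : d'.items = d.items ++ [(x, (d.size : Int))] :=
          PySem.Dict.items_insert_of_not_contains d _ hc'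
        have hsz : (d'.size : Int) = (d.size : Int) + 1 := by
          have := congrArg List.length hitems
          simp [PySem.Dict.size] at this ⊢
          omega
        have hit' : d'.items = (PySem.List.enumerate d'.keys 0).map (fun p => (p.2, p.1)) := by
          rw [hitems, hkeys, enumerate_append_singleton, hit]
          have hlen : d.keys.length = d.size := by
            have := congrArg List.length hit
            simpa [PySem.Dict.size] using this.symm
          simp [hlen]
        have hadd : PySem.Set.add d.keys x = d.keys ++ [x] := by
          simp [PySem.Set.add, PySem.Set.contains, hmem]
        have := ih d' hnd' hit'
        rw [hsz] at this
        simpa [PySem.Set.update, hc', hadd, hkeys] using this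

-- ===== VERDICT (by name: the statement is the Claim_ definition above) =====
theorem to_ordional_enumeration_spec : Claim_equal_to_ordional_enumeration := by
  intro data _
  unfold Spec_to_ordional_enumeration to_ordional_enumeration to_ordional_enumeration_alt
  simp only []
  rw [sorted_keys_idx]
  have h := loop_inv data PySem.Dict.empty PySem.Dict.nodup_keys_empty
    (by simp [PySem.Dict.empty, PySem.Dict.keys, PySem.List.enumerate_nil])
  simpa [PySem.Set.update, PySem.Set.ofList_eq_foldl] using h
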